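-- pv_equiv track=rewrite | github.com/theSadeQ/dip-smc-pso | .test_artifacts/doc_examples/COVERAGE_ANALYSIS_METHODOLOGY_FRAMEWORK_2_0263578b.py | prioritize_coverage_tasks
-- ===== SOURCE A (Python) =====
-- from typing import Dict, List, Tuple
--
-- def prioritize_coverage_tasks(uncovered_lines: Dict[str, List[int]]) -> List[Tuple[str, int, str]]:
--     """Prioritize coverage improvement tasks by impact."""
--     tasks = []
--
--     for file_path, lines in uncovered_lines.items():
--         priority = "HIGH"
--         if 'safety' in file_path or 'critical' in file_path:
--             priority = "CRITICAL"
--         elif 'util' in file_path or 'helper' in file_path: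
--             priority = "MEDIUM"
--
--         tasks.append((file_path, len(lines), priority))
--
--     # Sort by priority and line count
--     priority_order = {"CRITICAL": 0, "HIGH": 1, "MEDIUM": 2}
--     tasks.sort(key=lambda x: (priority_order[x[2]], -x[1]))
--
--     return tasks
-- ===== SOURCE B (Python) =====
-- def prioritize_coverage_tasks(uncovered_lines):
--     """Prioritize coverage improvement tasks: partition into priority buckets in one pass,
--     sort each bucket by descending line count, concatenate."""
--     critical, high, medium = [], [], []
--     for file_path, lines in uncovered_lines.items():
--         if 'safety' in file_path or 'critical' in file_path:
--             critical.append((file_path, len(lines), "CRITICAL"))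
--         elif 'util' in file_path or 'helper' in file_path:
--             medium.append((file_path, len(lines), "MEDIUM"))
--         else:
--             high.append((file_path, len(lines), "HIGH"))
--     for bucket in (critical, high, medium):
--         bucket.sort(key=lambda t: -t[1])
--     return critical + high + medium
-- ===== Notes on version B (the rewrite author's own statement) =====
-- stated objective: alternative
-- what changed: Instead of one global stable sort on the composite key (priority_order, -line_count), B partitions files into three priority buckets in a single pass, stably sorts each bucket by -line_count alone, and concatenates CRITICAL+HIGH+MEDIUM.
import Mathlib
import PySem

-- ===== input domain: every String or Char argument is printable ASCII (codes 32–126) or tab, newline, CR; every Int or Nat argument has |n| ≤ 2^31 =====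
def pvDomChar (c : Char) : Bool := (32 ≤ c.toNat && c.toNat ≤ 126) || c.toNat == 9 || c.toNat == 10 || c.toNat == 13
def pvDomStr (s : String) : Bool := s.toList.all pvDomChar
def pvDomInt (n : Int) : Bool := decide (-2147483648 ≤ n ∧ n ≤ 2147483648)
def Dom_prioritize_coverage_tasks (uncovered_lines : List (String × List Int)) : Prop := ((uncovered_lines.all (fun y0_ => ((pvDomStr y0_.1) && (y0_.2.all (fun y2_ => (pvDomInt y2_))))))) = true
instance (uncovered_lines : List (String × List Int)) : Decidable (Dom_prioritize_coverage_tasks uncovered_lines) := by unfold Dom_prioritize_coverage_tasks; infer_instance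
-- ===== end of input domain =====

-- B partitions into three priority buckets in one pass and stably sorts each bucket by
-- descending line count instead of A's single stable sort on the composite key (alternative
-- decomposition, same cost).

-- ===== PORT A =====
def prioritize_coverage_tasks (uncovered_lines : List (String × List Int)) : List (String × Int × String) :=
  let tasks := uncovered_lines.foldl (fun acc p =>
    let priority : String :=
      if PySem.Str.isIn "safety" p.1 || PySem.Str.isIn "critical" p.1 then "CRITICAL"
      else if PySem.Str.isIn "util" p.1 || PySem.Str.isIn "helper" p.1 then "MEDIUM"
      else "HIGH"
    acc ++ [(p.1, (p.2.length : Int), priority)]) []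
  let priority_order : PySem.Dict String Int :=
    ((PySem.Dict.empty.insert "CRITICAL" 0).insert "HIGH" 1).insert "MEDIUM" 2
  -- priority_order[x[2]]: x[2] is always one of the three inserted keys, so Python's []
  -- never raises and getD's default is unreachable
  PySem.List.sorted2 tasks (fun x => PySem.Dict.getD priority_order x.2.2 0) (fun x => -x.2.1)

-- ===== PORT B =====
def prioritize_coverage_tasks_alt (uncovered_lines : List (String × List Int)) : List (String × Int × String) :=
  let buckets := uncovered_lines.foldl
    (fun (acc : List (String × Int × String) × List (String × Int × String) × List (String × Int × String)) p =>
      if PySem.Str.isIn "safety" p.1 || PySem.Str.isIn "critical" p.1 then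
        (acc.1 ++ [(p.1, (p.2.length : Int), "CRITICAL")], acc.2.1, acc.2.2)
      else if PySem.Str.isIn "util" p.1 || PySem.Str.isIn "helper" p.1 then
        (acc.1, acc.2.1, acc.2.2 ++ [(p.1, (p.2.length : Int), "MEDIUM")])
      else
        (acc.1, acc.2.1 ++ [(p.1, (p.2.length : Int), "HIGH")], acc.2.2))
    ([], [], [])
  PySem.List.sorted buckets.1 (fun t => -t.2.1) ++
  PySem.List.sorted buckets.2.1 (fun t => -t.2.1) ++
  PySem.List.sorted buckets.2.2 (fun t => -t.2.1)

-- ===== PRECONDITION & SPEC =====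
def Spec_prioritize_coverage_tasks (uncovered_lines : List (String × List Int)) (out : List (String × Int × String)) : Prop := out = prioritize_coverage_tasks_alt uncovered_lines
instance (uncovered_lines : List (String × List Int)) (out : List (String × Int × String)) : Decidable (Spec_prioritize_coverage_tasks uncovered_lines out) := by unfold Spec_prioritize_coverage_tasks; infer_instance

-- ===== CLAIM (what is proved, stated in full; the proofs are below) =====
def Claim_equal_prioritize_coverage_tasks : Prop := ∀ (uncovered_lines : List (String × List Int)), Dom_prioritize_coverage_tasks uncovered_lines → Spec_prioritize_coverage_tasks uncovered_lines (prioritize_coverage_tasks uncovered_lines)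

-- ===== LEMMAS AND PROOFS =====

-- the element each iteration of either loop appends: (path, line count, priority string)
def pctMk (p : String × List Int) : String × Int × String :=
  (p.1, (p.2.length : Int),
    if PySem.Str.isIn "safety" p.1 || PySem.Str.isIn "critical" p.1 then "CRITICAL"
    else if PySem.Str.isIn "util" p.1 || PySem.Str.isIn "helper" p.1 then "MEDIUM"
    else "HIGH")

def pctDict : PySem.Dict String Int :=
  ((PySem.Dict.empty.insert "CRITICAL" 0).insert "HIGH" 1).insert "MEDIUM" 2

lemma insertBy_cons {α : Type} (b : α → α → Bool) (x y : α) (ys : List α) :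
    PySem.List.insertBy b x (y :: ys) =
      if b x y then x :: y :: ys else y :: PySem.List.insertBy b x ys := by
  simp [PySem.List.insertBy]

lemma insertBy_congr {α : Type} (b b' : α → α → Bool) (x : α) (l : List α)
    (h : ∀ y ∈ l, b x y = b' x y) :
    PySem.List.insertBy b x l = PySem.List.insertBy b' x l := by
  induction l with
  | nil => rfl
  | cons y ys ih =>
      rw [insertBy_cons, insertBy_cons, h y (by simp),
        ih (fun z hz => h z (by simp [hz]))]

lemma insertBy_append_of_not {α : Type} (b : α → α → Bool) (x : α) (l r : List α)
    (h : ∀ y ∈ l, b x y = false) :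
    PySem.List.insertBy b x (l ++ r) = l ++ PySem.List.insertBy b x r := by
  induction l with
  | nil => rfl
  | cons y ys ih =>
      rw [List.cons_append, insertBy_cons, h y (by simp),
        ih (fun z hz => h z (by simp [hz]))]
      simp

lemma insertBy_append_congr {α : Type} (b b' : α → α → Bool) (x : α) (l r : List α)
    (hc : ∀ y ∈ l, b x y = b' x y) (hr : ∀ y ∈ r, b x y = true) :
    PySem.List.insertBy b x (l ++ r) = PySem.List.insertBy b' x l ++ r := by
  induction l with
  | nil =>
      cases r with
      | nil => rfl
      | cons z zs =>
          simp only [List.nil_append]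
          rw [insertBy_cons, hr z (by simp)]
          rfl
  | cons y ys ih =>
      rw [List.cons_append, insertBy_cons, insertBy_cons, hc y (by simp)]
      by_cases hby : b' x y
      · simp [hby]
      · simp only [hby, if_neg, Bool.false_eq_true, not_false_iff]
        rw [ih (fun z hz => hc z (by simp [hz]))]
        simp

lemma sorted_snoc {α κ : Type} [LT κ] [DecidableLT κ] (l : List α) (x : α) (key : α → κ) :
    PySem.List.sorted (l ++ [x]) key false =
      PySem.List.insertBy (fun a b => decide (key a < key b)) x (PySem.List.sorted l key false) := by
  rw [PySem.List.sorted_eq_foldl_insertBy, PySem.List.sorted_eq_foldl_insertBy, List.foldl_append]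
  rfl

def pctLex (k1 k2 : (String × Int × String) → Int) : (String × Int × String) → (String × Int × String) → Bool :=
  fun a b => decide (k1 a < k1 b) || (!decide (k1 b < k1 a) && decide (k2 a < k2 b))

lemma sorted2_eq_foldl (xs : List (String × Int × String)) (k1 k2 : (String × Int × String) → Int) :
    PySem.List.sorted2 xs k1 k2 =
      xs.foldl (fun acc x => PySem.List.insertBy (pctLex k1 k2) x acc) [] := rfl

lemma sorted2_snoc (l : List (String × Int × String)) (x : String × Int × String)
    (k1 k2 : (String × Int × String) → Int) :
    PySem.List.sorted2 (l ++ [x]) k1 k2 =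
      PySem.List.insertBy (pctLex k1 k2) x (PySem.List.sorted2 l k1 k2) := by
  rw [sorted2_eq_foldl, sorted2_eq_foldl, List.foldl_append]
  rfl

lemma pctDict_C : PySem.Dict.getD pctDict "CRITICAL" 0 = 0 := by decide
lemma pctDict_H : PySem.Dict.getD pctDict "HIGH" 0 = 1 := by decide
lemma pctDict_M : PySem.Dict.getD pctDict "MEDIUM" 0 = 2 := by decide

-- A's stable sort on the composite key decomposes into per-priority stable sorts, concatenated
lemma pct_decomp (ts : List (String × Int × String))
    (h : ∀ x ∈ ts, x.2.2 = "CRITICAL" ∨ x.2.2 = "HIGH" ∨ x.2.2 = "MEDIUM") :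
    PySem.List.sorted2 ts (fun x => PySem.Dict.getD pctDict x.2.2 0) (fun x => -x.2.1) =
      PySem.List.sorted (ts.filter fun x => x.2.2 == "CRITICAL") (fun t => -t.2.1) ++
      PySem.List.sorted (ts.filter fun x => x.2.2 == "HIGH") (fun t => -t.2.1) ++
      PySem.List.sorted (ts.filter fun x => x.2.2 == "MEDIUM") (fun t => -t.2.1) := by
  induction ts using List.reverseRecOn with
  | nil => rfl
  | append_singleton l x ih =>
      have hl : ∀ y ∈ l, y.2.2 = "CRITICAL" ∨ y.2.2 = "HIGH" ∨ y.2.2 = "MEDIUM" :=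
        fun y hy => h y (by simp [hy])
      have hx := h x (by simp)
      rw [sorted2_snoc, ih hl]
      have memC : ∀ y ∈ PySem.List.sorted (l.filter fun x => x.2.2 == "CRITICAL") (fun t => -t.2.1) false,
          y.2.2 = "CRITICAL" := by
        intro y hy
        rw [PySem.List.mem_sorted] at hy
        simpa using (List.mem_filter.mp hy).2
      have memH : ∀ y ∈ PySem.List.sorted (l.filter fun x => x.2.2 == "HIGH") (fun t => -t.2.1) false,
          y.2.2 = "HIGH" := by
        intro y hy
        rw [PySem.List.mem_sorted] at hy
        simpa using (List.mem_filter.mp hy).2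
      have memM : ∀ y ∈ PySem.List.sorted (l.filter fun x => x.2.2 == "MEDIUM") (fun t => -t.2.1) false,
          y.2.2 = "MEDIUM" := by
        intro y hy
        rw [PySem.List.mem_sorted] at hy
        simpa using (List.mem_filter.mp hy).2
      rcases hx with hx | hx | hx
      · -- x is CRITICAL: insert into the first block
        have fC : (l ++ [x]).filter (fun x => x.2.2 == "CRITICAL") =
            l.filter (fun x => x.2.2 == "CRITICAL") ++ [x] := by simp [hx]
        have fH : (l ++ [x]).filter (fun x => x.2.2 == "HIGH") =
            l.filter (fun x => x.2.2 == "HIGH") := by simp [hx]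
        have fM : (l ++ [x]).filter (fun x => x.2.2 == "MEDIUM") =
            l.filter (fun x => x.2.2 == "MEDIUM") := by simp [hx]
        rw [fC, fH, fM, sorted_snoc]
        simp only [List.append_assoc]
        apply insertBy_append_congr
        · intro y hy
          simp [pctLex, hx, memC y hy, pctDict_C]
        · intro y hy
          rcases List.mem_append.mp hy with hy | hy
          · simp [pctLex, hx, memH y hy, pctDict_C, pctDict_H]
          · simp [pctLex, hx, memM y hy, pctDict_C, pctDict_M]
      · -- x is HIGH: skip the CRITICAL block, insert into the second
        have fC : (l ++ [x]).filter (fun x => x.2.2 == "CRITICAL") =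
            l.filter (fun x => x.2.2 == "CRITICAL") := by simp [hx]
        have fH : (l ++ [x]).filter (fun x => x.2.2 == "HIGH") =
            l.filter (fun x => x.2.2 == "HIGH") ++ [x] := by simp [hx]
        have fM : (l ++ [x]).filter (fun x => x.2.2 == "MEDIUM") =
            l.filter (fun x => x.2.2 == "MEDIUM") := by simp [hx]
        rw [fC, fH, fM, sorted_snoc]
        simp only [List.append_assoc]
        rw [insertBy_append_of_not _ x _ _
          (by intro y hy; simp [pctLex, hx, memC y hy, pctDict_C, pctDict_H])]
        congr 1
        apply insertBy_append_congr
        · intro y hy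
          simp [pctLex, hx, memH y hy, pctDict_H]
        · intro y hy
          simp [pctLex, hx, memM y hy, pctDict_H, pctDict_M]
      · -- x is MEDIUM: skip the first two blocks, insert into the third
        have fC : (l ++ [x]).filter (fun x => x.2.2 == "CRITICAL") =
            l.filter (fun x => x.2.2 == "CRITICAL") := by simp [hx]
        have fH : (l ++ [x]).filter (fun x => x.2.2 == "HIGH") =
            l.filter (fun x => x.2.2 == "HIGH") := by simp [hx]
        have fM : (l ++ [x]).filter (fun x => x.2.2 == "MEDIUM") =
            l.filter (fun x => x.2.2 == "MEDIUM") ++ [x] := by simp [hx]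
        rw [fC, fH, fM, sorted_snoc]
        rw [insertBy_append_of_not _ x _ _
          (by intro y hy
              rcases List.mem_append.mp hy with hy | hy
              · simp [pctLex, hx, memC y hy, pctDict_C, pctDict_M]
              · simp [pctLex, hx, memH y hy, pctDict_H, pctDict_M])]
        congr 1
        apply insertBy_congr
        intro y hy
        simp [pctLex, hx, memM y hy, pctDict_M]

-- A's task-building loop builds the map of pctMk
lemma pct_tasks_eq_map (ul : List (String × List Int)) :
    ul.foldl (fun acc p =>
      acc ++ [(p.1, (p.2.length : Int),
        if PySem.Str.isIn "safety" p.1 || PySem.Str.isIn "critical" p.1 then "CRITICAL"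
        else if PySem.Str.isIn "util" p.1 || PySem.Str.isIn "helper" p.1 then "MEDIUM"
        else "HIGH")]) [] = ul.map pctMk := by
  have := PySem.List.foldl_append_singleton_eq_map pctMk ul []
  simpa [pctMk] using this

-- B's bucket loop computes the three priority-filtered sublists of the mapped tasks
lemma pct_buckets (ul : List (String × List Int))
    (c h m : List (String × Int × String)) :
    ul.foldl
      (fun (acc : List (String × Int × String) × List (String × Int × String) × List (String × Int × String)) p =>
        if PySem.Str.isIn "safety" p.1 || PySem.Str.isIn "critical" p.1 then
          (acc.1 ++ [(p.1, (p.2.length : Int), "CRITICAL")], acc.2.1, acc.2.2)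
        else if PySem.Str.isIn "util" p.1 || PySem.Str.isIn "helper" p.1 then
          (acc.1, acc.2.1, acc.2.2 ++ [(p.1, (p.2.length : Int), "MEDIUM")])
        else
          (acc.1, acc.2.1 ++ [(p.1, (p.2.length : Int), "HIGH")], acc.2.2))
      (c, h, m) =
    (c ++ (ul.map pctMk).filter (fun x => x.2.2 == "CRITICAL"),
     h ++ (ul.map pctMk).filter (fun x => x.2.2 == "HIGH"),
     m ++ (ul.map pctMk).filter (fun x => x.2.2 == "MEDIUM")) := by
  induction ul generalizing c h m with
  | nil => simp
  | cons p l ih =>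
      simp only [List.foldl_cons, List.map_cons]
      by_cases h1 : PySem.Str.isIn "safety" p.1 || PySem.Str.isIn "critical" p.1
      · rw [if_pos h1, ih]
        simp only [pctMk]
        rw [if_pos h1]
        simp
      · rw [if_neg h1]
        by_cases h2 : PySem.Str.isIn "util" p.1 || PySem.Str.isIn "helper" p.1
        · rw [if_pos h2, ih]
          simp only [pctMk]
          rw [if_neg h1, if_pos h2]
          simp
        · rw [if_neg h2, ih]
          simp only [pctMk]
          rw [if_neg h1, if_neg h2]
          simp

-- ===== VERDICT (by name: the statement is the Claim_ definition above) =====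
theorem prioritize_coverage_tasks_spec : Claim_equal_prioritize_coverage_tasks := by
  intro ul _
  show prioritize_coverage_tasks ul = prioritize_coverage_tasks_alt ul
  simp only [prioritize_coverage_tasks, prioritize_coverage_tasks_alt]
  rw [pct_tasks_eq_map, pct_buckets]
  simp only [List.nil_append]
  rw [show (((PySem.Dict.empty.insert "CRITICAL" (0:Int)).insert "HIGH" 1).insert "MEDIUM" 2) = pctDict from rfl]
  apply pct_decomp
  intro x hx
  rcases List.mem_map.mp hx with ⟨p, _, rfl⟩
  simp only [pctMk]
  split_ifs <;> simp
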